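-- pv_equiv track=rewrite | github.com/guykatzir9/C_vuln_analyzer | analyzer/scanner.py | split_code_into_numbered_chunks
-- ===== SOURCE A (Python) =====
-- def split_code_into_numbered_chunks(code: str, max_lines: int = 50) -> list[str]:
--     lines = code.splitlines()
--     chunks = []
--
--     for i in range(0, len(lines), max_lines):
--         chunk_lines = lines[i:i + max_lines]
--         start_line = i + 1
--         numbered_chunk = "\n".join(f"Line {start_line + j}: {line}" for j, line in enumerate(chunk_lines))
--
--         chunks.append(numbered_chunk)
--
--     return chunks
-- ===== SOURCE B (Python) =====
-- def split_code_into_numbered_chunks(code: str, max_lines: int = 50) -> list[str]: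
--     # Single streaming pass: number each line as it arrives, collect it in a
--     # buffer, and flush the buffer as a chunk whenever it fills up.
--     chunks: list[str] = []
--     buf: list[str] = []
--     for k, line in enumerate(code.splitlines(), 1):
--         buf.append(f"Line {k}: {line}")
--         if len(buf) == max_lines:
--             chunks.append("\n".join(buf))
--             buf = []
--     if buf:
--         chunks.append("\n".join(buf))
--     return chunks
-- ===== Notes on version B (the rewrite author's own statement) =====
-- stated objective: alternative
-- what changed: B replaces A's index-arithmetic loop over range(0, len, max_lines) with slicing and per-chunk renumbering by a single streaming pass that numbers each line as it arrives, accumulates it in a buffer, and flushes the buffer as a chunk whenever it fills; no slicing, no range, no start_line arithmetic.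
-- outside the precondition, e.g. on split_code_into_numbered_chunks('a', -1): A returns [], B returns ['Line 1: a']; on split_code_into_numbered_chunks('a', 0): A raises ValueError, B returns ['Line 1: a']
import Mathlib
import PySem

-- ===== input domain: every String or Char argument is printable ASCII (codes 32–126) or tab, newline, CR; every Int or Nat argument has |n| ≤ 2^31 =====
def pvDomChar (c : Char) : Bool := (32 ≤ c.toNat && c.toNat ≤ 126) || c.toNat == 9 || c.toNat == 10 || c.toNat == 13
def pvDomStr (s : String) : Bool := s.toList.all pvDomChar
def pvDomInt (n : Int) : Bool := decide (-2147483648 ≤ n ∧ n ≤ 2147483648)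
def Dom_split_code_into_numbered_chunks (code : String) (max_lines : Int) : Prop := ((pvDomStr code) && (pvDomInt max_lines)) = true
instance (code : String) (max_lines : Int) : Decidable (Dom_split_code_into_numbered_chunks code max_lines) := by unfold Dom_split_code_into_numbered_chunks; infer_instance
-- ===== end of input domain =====

-- B replaces A's range/slice loop (index arithmetic, per-chunk renumbering) by one
-- streaming pass with a fill-and-flush buffer; same cost, different mechanism.

-- ===== PORT A =====
def split_code_into_numbered_chunks (code : String) (max_lines : Int) : List String :=
  let lines := PySem.Str.splitlines code
  (PySem.List.pyRange 0 (lines.length : Int) max_lines).foldl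
    (fun chunks i =>
      chunks ++ [PySem.Str.join "\n"
        ((PySem.List.enumerate (PySem.List.slice lines (some i) (some (i + max_lines))) 0).map
          (fun p => "Line " ++ PySem.Int.toStr ((i + 1) + p.1) ++ ": " ++ p.2))]) []

-- ===== PORT B =====
def split_code_into_numbered_chunks_alt (code : String) (max_lines : Int) : List String :=
  let st := (PySem.List.enumerate (PySem.Str.splitlines code) 1).foldl
    (fun (st : List String × List String) p =>
      let buf' := st.2 ++ ["Line " ++ PySem.Int.toStr p.1 ++ ": " ++ p.2]
      if (buf'.length : Int) = max_lines then (st.1 ++ [PySem.Str.join "\n" buf'], [])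
      else (st.1, buf'))
    ([], [])
  if st.2.isEmpty then st.1 else st.1 ++ [PySem.Str.join "\n" st.2]

-- ===== PRECONDITION & SPEC =====
-- Pre_ excludes max_lines ≤ 0: at 0 Python's range(0, n, 0) raises ValueError in A, and for
-- a negative max_lines — a nonsensical chunk size nobody would specify — A's empty list is an
-- artefact of range-step semantics while B's buffer never fills and flushes one chunk.
def Pre_split_code_into_numbered_chunks (code : String) (max_lines : Int) : Prop := 0 < max_lines
instance (code : String) (max_lines : Int) : Decidable (Pre_split_code_into_numbered_chunks code max_lines) := by unfold Pre_split_code_into_numbered_chunks; infer_instance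
def pvWitness_split_code_into_numbered_chunks : String × Int := ("a\nb\nc", 2)

def Spec_split_code_into_numbered_chunks (code : String) (max_lines : Int) (out : List String) : Prop := out = split_code_into_numbered_chunks_alt code max_lines
instance (code : String) (max_lines : Int) (out : List String) : Decidable (Spec_split_code_into_numbered_chunks code max_lines out) := by unfold Spec_split_code_into_numbered_chunks; infer_instance

-- ===== CLAIM (what is proved, stated in full; the proofs are below) =====
def Claim_equal_split_code_into_numbered_chunks : Prop := ∀ (code : String) (max_lines : Int), Dom_split_code_into_numbered_chunks code max_lines → Pre_split_code_into_numbered_chunks code max_lines → Spec_split_code_into_numbered_chunks code max_lines (split_code_into_numbered_chunks code max_lines)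

-- ===== LEMMAS AND PROOFS =====

-- The common reference shape: group ys into blocks of k+1 lines, joining each block.
def gchunks (k : Nat) : List String → List String
  | [] => []
  | y :: t => PySem.Str.join "\n" ((y :: t).take (k + 1)) :: gchunks k ((y :: t).drop (k + 1))
termination_by ys => ys.length
decreasing_by simp only [List.length_drop, List.length_cons]; omega

lemma gchunks_nil (k : Nat) : gchunks k [] = [] := by
  rw [gchunks.eq_def]

lemma gchunks_cons (k : Nat) (y : String) (t : List String) :
    gchunks k (y :: t)
      = PySem.Str.join "\n" ((y :: t).take (k + 1)) :: gchunks k ((y :: t).drop (k + 1)) := by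
  rw [gchunks.eq_def]

lemma gchunks_ne_nil (k : Nat) (zs : List String) (h : zs ≠ []) :
    gchunks k zs = PySem.Str.join "\n" (zs.take (k + 1)) :: gchunks k (zs.drop (k + 1)) := by
  cases zs with
  | nil => exact absurd rfl h
  | cons y t => exact gchunks_cons k y t

-- ---- A-side: enumerate / slice bookkeeping ----

lemma enumerate_take {α : Type} (xs : List α) (m : Nat) (s : Int) :
    PySem.List.enumerate (xs.take m) s = (PySem.List.enumerate xs s).take m := by
  induction xs generalizing m s with
  | nil => simp [PySem.List.enumerate_nil]
  | cons x t ih =>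
    cases m with
    | zero => simp
    | succ m' => simp [PySem.List.enumerate_cons, ih]

lemma enumerate_drop {α : Type} (xs : List α) (a : Nat) (s : Int) :
    PySem.List.enumerate (xs.drop a) (s + a) = (PySem.List.enumerate xs s).drop a := by
  induction xs generalizing a s with
  | nil => simp [PySem.List.enumerate_nil]
  | cons x t ih =>
    cases a with
    | zero => simp
    | succ a' =>
      simp only [List.drop_succ_cons, PySem.List.enumerate_cons]
      rw [show s + ((a' + 1 : Nat) : Int) = (s + 1) + (a' : Int) by push_cast; ring]
      exact ih a' (s + 1)

lemma enumerate_map_shift {α β : Type} (G : Int → α → β) (xs : List α) (c s : Int) :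
    (PySem.List.enumerate xs s).map (fun p => G (c + p.1) p.2)
      = (PySem.List.enumerate xs (c + s)).map (fun p => G p.1 p.2) := by
  induction xs generalizing s with
  | nil => simp [PySem.List.enumerate_nil]
  | cons x t ih =>
    simp only [PySem.List.enumerate_cons, List.map_cons, ih (s + 1)]
    rw [show c + (s + 1) = (c + s) + 1 by ring]

-- A's per-chunk numbering of lines[a : a+m] equals the slice of the globally numbered list
lemma chunk_eq (lines : List String) (a m : Nat) :
    (PySem.List.enumerate ((lines.drop a).take m) 0).map
        (fun p => "Line " ++ PySem.Int.toStr (((a : Int) + 1) + p.1) ++ ": " ++ p.2)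
      = ((((PySem.List.enumerate lines 0).map
            (fun p => "Line " ++ PySem.Int.toStr (p.1 + 1) ++ ": " ++ p.2)).drop a).take m) := by
  rw [← List.map_drop, ← List.map_take, ← enumerate_drop lines a 0, ← enumerate_take]
  have hfun : (fun p : Int × String => "Line " ++ PySem.Int.toStr (((a : Int) + 1) + p.1) ++ ": " ++ p.2)
      = (fun p : Int × String =>
          (fun (k : Int) (l : String) => "Line " ++ PySem.Int.toStr (k + 1) ++ ": " ++ l) ((a : Int) + p.1) p.2) := by
    funext p
    rw [show ((a : Int) + 1) + p.1 = ((a : Int) + p.1) + 1 by ring]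
  rw [hfun, enumerate_map_shift (fun k l => "Line " ++ PySem.Int.toStr (k + 1) ++ ": " ++ l)
        ((lines.drop a).take m) (a : Int) 0]
  simp

-- the two numbering passes (enumerate from 1, enumerate from 0 with "+1") coincide
lemma numbered_shift (xs : List String) :
    (PySem.List.enumerate xs 1).map (fun p => "Line " ++ PySem.Int.toStr p.1 ++ ": " ++ p.2)
      = (PySem.List.enumerate xs 0).map (fun p => "Line " ++ PySem.Int.toStr (p.1 + 1) ++ ": " ++ p.2) := by
  have h := enumerate_map_shift (fun k l => "Line " ++ PySem.Int.toStr k ++ ": " ++ l) xs 1 0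
  simp only [add_zero] at h
  rw [← h]
  apply List.map_congr_left
  intro p _
  rw [show (1 : Int) + p.1 = p.1 + 1 by ring]

-- ---- pyRange with a positive step: peel off the first index ----

lemma pyRange_zero_pos_cons (b s : Int) (hs : 0 < s) (hb : 0 < b) :
    PySem.List.pyRange 0 b s = 0 :: (PySem.List.pyRange 0 (b - s) s).map (· + s) := by
  rw [PySem.List.pyRange_of_pos _ _ hs, PySem.List.pyRange_of_pos _ _ hs]
  have hq : (b - 0 + s - 1) / s = (b - s - 0 + s - 1) / s + 1 := by
    have h := Int.add_mul_ediv_right (b - s - 0 + s - 1) 1 (show s ≠ 0 by omega)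
    rw [one_mul] at h
    rw [← h]; ring_nf
  by_cases hsb : 0 < b - s
  · have h1 : 0 ≤ (b - s - 0 + s - 1) / s := Int.ediv_nonneg (by omega) (by omega)
    have h2 : ((b - s - 0 + s - 1) / s + 1).toNat = ((b - s - 0 + s - 1) / s).toNat + 1 := by
      omega
    rw [if_pos hb, if_pos hsb, hq, h2, List.range_succ_eq_map]
    simp only [List.map_cons, List.map_map]
    congr 1
    · simp
    · apply List.map_congr_left
      intro j _
      simp only [Function.comp, Nat.succ_eq_add_one]
      push_cast
      ring
  · have hz : (b - s - 0 + s - 1) / s = 0 :=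
      Int.ediv_eq_zero_of_lt (by omega) (by omega)
    rw [if_pos hb, if_neg hsb, hq, hz]
    simp

-- A's map over range(0, n, k+1) of drop/take blocks IS gchunks
lemma map_pyRange_eq_gchunks (k : Nat) (M : Int) (hM : M = (k : Int) + 1) :
    ∀ (fuel : Nat) (ys : List String), ys.length ≤ fuel →
      (PySem.List.pyRange 0 (ys.length : Int) M).map
          (fun i => PySem.Str.join "\n" ((ys.drop i.toNat).take (k + 1)))
        = gchunks k ys := by
  intro fuel
  have hMpos : (0 : Int) < M := by omega
  induction fuel with
  | zero =>
    intro ys hy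
    have hnil : ys = [] := by
      cases ys with
      | nil => rfl
      | cons y t => simp at hy
    subst hnil
    rw [gchunks_nil]
    simp [PySem.List.pyRange_of_pos _ _ hMpos]
  | succ f ih =>
    intro ys hy
    cases hys : ys with
    | nil =>
      rw [gchunks_nil]
      simp [PySem.List.pyRange_of_pos _ _ hMpos]
    | cons y t =>
      have hlen : 0 < (ys.length : Int) := by
        rw [hys]; simp only [List.length_cons]; push_cast; omega
      rw [← hys]
      rw [pyRange_zero_pos_cons _ _ hMpos hlen]
      rw [List.map_cons, List.map_map]
      have hhead : PySem.Str.join "\n" ((ys.drop (0:Int).toNat).take (k + 1))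
          = PySem.Str.join "\n" (ys.take (k + 1)) := by simp
      rw [gchunks_ne_nil k ys (by rw [hys]; simp), ← hhead]
      congr 1
      by_cases hsmall : ys.length ≤ k
      · have h2 : PySem.List.pyRange 0 ((ys.length : Int) - M) M = [] := by
          rw [PySem.List.pyRange_of_pos _ _ hMpos, if_neg (by omega)]
          simp
        have h3 : ys.drop (k + 1) = [] := List.drop_eq_nil_of_le (by omega)
        rw [h2, h3, gchunks_nil]
        simp
      · -- the recursive block: shift every index by M and recurse on ys.drop (k+1)
        have hdl : ((ys.drop (k + 1)).length : Int) = (ys.length : Int) - M := by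
          simp only [List.length_drop]; push_cast [Nat.cast_sub (by omega : k + 1 ≤ ys.length)]; omega
        have hfl : (ys.drop (k + 1)).length ≤ f := by
          simp only [List.length_drop]
          rw [hys] at hy
          simp only [List.length_cons] at hy
          rw [hys]
          simp only [List.length_cons]
          omega
        rw [← ih (ys.drop (k + 1)) hfl, hdl]
        apply List.map_congr_left
        intro i hi
        have h0i : 0 ≤ i := ((PySem.List.mem_pyRange_iff_of_pos hMpos i).mp hi).1
        simp only [Function.comp]
        have hiM : (i + M).toNat = (k + 1) + i.toNat := by omega
        rw [hiM, ← List.drop_drop]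

-- ---- B-side: the streaming fill-and-flush buffer machine ----

def bstep (M : Int) (st : List String × List String) (x : String) : List String × List String :=
  let buf' := st.2 ++ [x]
  if (buf'.length : Int) = M then (st.1 ++ [PySem.Str.join "\n" buf'], []) else (st.1, buf')

def bfin (st : List String × List String) : List String :=
  if st.2.isEmpty then st.1 else st.1 ++ [PySem.Str.join "\n" st.2]

lemma bmachine_eq_gchunks (k : Nat) (M : Int) (hM : M = (k : Int) + 1) :
    ∀ (ys acc buf : List String), buf.length ≤ k →
      bfin (ys.foldl (bstep M) (acc, buf)) = acc ++ gchunks k (buf ++ ys) := by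
  intro ys
  induction ys with
  | nil =>
    intro acc buf hb
    cases hbuf : buf with
    | nil =>
      simp only [List.foldl_nil, List.append_nil, bfin, gchunks_nil]
      simp
    | cons b bt =>
      rw [← hbuf]
      have h1 : buf.take (k + 1) = buf := List.take_of_length_le (by omega)
      have h2 : buf.drop (k + 1) = [] := List.drop_eq_nil_of_le (by omega)
      simp only [List.foldl_nil, List.append_nil, bfin]
      rw [gchunks_ne_nil k buf (by rw [hbuf]; simp), h1, h2, gchunks_nil]
      rw [if_neg (by rw [hbuf]; simp)]
  | cons x xs ih =>
    intro acc buf hb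
    simp only [List.foldl_cons]
    by_cases hfull : ((buf ++ [x]).length : Int) = M
    · have hstep : bstep M (acc, buf) x = (acc ++ [PySem.Str.join "\n" (buf ++ [x])], []) := by
        simp only [bstep]
        rw [if_pos hfull]
      rw [hstep, ih _ [] (by simp)]
      have hlen : (buf ++ [x]).length = k + 1 := by
        have hfull' : ((buf.length : Int) + 1) = M := by simpa using hfull
        simp only [List.length_append, List.length_cons, List.length_nil]
        omega
      rw [gchunks_ne_nil k (buf ++ x :: xs) (by simp)]
      have hsplit : buf ++ x :: xs = (buf ++ [x]) ++ xs := by simp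
      rw [hsplit, List.take_left' hlen, List.drop_left' hlen]
      simp
    · have hstep : bstep M (acc, buf) x = (acc, buf ++ [x]) := by
        simp only [bstep]
        rw [if_neg hfull]
      have hb' : (buf ++ [x]).length ≤ k := by
        have hfull' : ¬ ((buf.length : Int) + 1) = M := by simpa using hfull
        simp only [List.length_append, List.length_cons, List.length_nil]
        omega
      rw [hstep, ih _ (buf ++ [x]) hb']
      simp

-- ===== VERDICT (by name: the statement is the Claim_ definition above) =====
theorem split_code_into_numbered_chunks_spec : Claim_equal_split_code_into_numbered_chunks := by
  intro code max_lines _hdom hpre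
  unfold Spec_split_code_into_numbered_chunks
  have hpre' : (0:Int) < max_lines := hpre
  set k : Nat := (max_lines - 1).toNat with hk
  have hM : max_lines = (k : Int) + 1 := by omega
  set lines := PySem.Str.splitlines code with hlines
  set numbered := (PySem.List.enumerate lines 1).map
      (fun p => "Line " ++ PySem.Int.toStr p.1 ++ ": " ++ p.2) with hnum
  -- B side: the fold over enumerate is the buffer machine run on the numbered list
  have hB : split_code_into_numbered_chunks_alt code max_lines = gchunks k numbered := by
    show bfin ((PySem.List.enumerate lines 1).foldl
      (fun (st : List String × List String) p =>
        let buf' := st.2 ++ ["Line " ++ PySem.Int.toStr p.1 ++ ": " ++ p.2]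
        if (buf'.length : Int) = max_lines then (st.1 ++ [PySem.Str.join "\n" buf'], [])
        else (st.1, buf'))
      ([], [])) = gchunks k numbered
    have hfold : (PySem.List.enumerate lines 1).foldl
        (fun (st : List String × List String) p =>
          let buf' := st.2 ++ ["Line " ++ PySem.Int.toStr p.1 ++ ": " ++ p.2]
          if (buf'.length : Int) = max_lines then (st.1 ++ [PySem.Str.join "\n" buf'], [])
          else (st.1, buf'))
        ([], [])
        = numbered.foldl (bstep max_lines) ([], []) := by
      rw [hnum, List.foldl_map]
      rfl
    rw [hfold, bmachine_eq_gchunks k max_lines hM numbered [] [] (by simp)]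
    simp
  rw [hB]
  -- A side: fold over pyRange = map of drop/take blocks of the same numbered list
  unfold split_code_into_numbered_chunks
  rw [← hlines]
  rw [PySem.List.foldl_append_singleton_eq_map, List.nil_append]
  have hlen : (lines.length : Int) = (numbered.length : Int) := by
    rw [hnum]; simp
  rw [hlen]
  rw [← map_pyRange_eq_gchunks k max_lines hM numbered.length numbered le_rfl]
  apply List.map_congr_left
  intro i hi
  have hmem := (PySem.List.mem_pyRange_iff_of_pos hpre' i).mp hi
  have hi0 : 0 ≤ i := hmem.1
  congr 1
  rw [PySem.List.slice_toNat lines hi0 (by omega)]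
  have htake : ((i + max_lines).toNat - i.toNat) = k + 1 := by omega
  rw [htake]
  rw [show i = ((i.toNat : Nat) : Int) from (Int.toNat_of_nonneg hi0).symm]
  simp only [Int.toNat_natCast]
  rw [chunk_eq lines i.toNat (k + 1), hnum, numbered_shift]
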